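-- pv_equiv track=rewrite | github.com/gsethupathy5/AI_For_CS | python/2285.maximum-total-importance-of-roads/solution.py | maximumImportance
-- ===== SOURCE A (Python) =====
-- from typing import List
--
-- def maximumImportance(n: int, roads: List[List[int]]) -> int:
--     from collections import defaultdict
--     graph = defaultdict(list)
--     for road in roads:
--         a, b = road
--         graph[a].append(b)
--         graph[b].append(a)
--
--     visited = [False] * n
--     values = [-1] * n
--
--     def dfs(node, val):
--         visited[node] = True
--         values[node] = val
--         importance = 0
--         for neighbor in graph[node]:
--             if not visited[neighbor]:
--                 importance += val + dfs(neighbor, n - val)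
--         return importance
--
--     return dfs(0, n)
-- ===== SOURCE B (Python) =====
-- def maximumImportance(n, roads):
--     # Iterative DFS with an explicit frame stack; counts tree edges out of
--     # even-depth nodes (their val is always n, odd-depth val is 0) and
--     # multiplies by n once at the end.
--     adj = {}
--     for a, b in roads:
--         adj[a] = adj.get(a, []) + [b]
--         adj[b] = adj.get(b, []) + [a]
--     visited = [False] * n
--     visited[0] = True
--     stack = [(True, adj.get(0, []), 0)]
--     result = 0
--     while stack:
--         even, nbrs, acc = stack.pop()
--         if nbrs:
--             v, rest = nbrs[0], nbrs[1:]
--             stack.append((even, rest, acc))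
--             if not visited[v]:
--                 visited[v] = True
--                 stack.append((not even, adj.get(v, []), 0))
--         else:
--             if stack:
--                 e2, nb2, acc2 = stack.pop()
--                 stack.append((e2, nb2, acc2 + (1 if e2 else 0) + acc))
--             else:
--                 result = acc
--     return n * result
-- ===== Notes on version B (the rewrite author's own statement) =====
-- stated objective: alternative
-- what changed: The recursive DFS summing per-edge vals is replaced by an iterative explicit-stack DFS that only counts tree edges leaving even-depth nodes (whose val is always n; odd-depth val is always 0) and multiplies the count by n once at the end; the values array is dropped entirely. Pre_ excludes inputs where A raises (n < 1, a road not of length 2, or an out-of-range label while node 0 occurs in some road); out-of-range labels unreachable from node 0 still let A return, so Pre_ is slightly narrower than A's crash set.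
-- outside the precondition, e.g. on maximumImportance(2, [[0, 1], [5, 6]]): A returns 2, B returns 2
import Mathlib
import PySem

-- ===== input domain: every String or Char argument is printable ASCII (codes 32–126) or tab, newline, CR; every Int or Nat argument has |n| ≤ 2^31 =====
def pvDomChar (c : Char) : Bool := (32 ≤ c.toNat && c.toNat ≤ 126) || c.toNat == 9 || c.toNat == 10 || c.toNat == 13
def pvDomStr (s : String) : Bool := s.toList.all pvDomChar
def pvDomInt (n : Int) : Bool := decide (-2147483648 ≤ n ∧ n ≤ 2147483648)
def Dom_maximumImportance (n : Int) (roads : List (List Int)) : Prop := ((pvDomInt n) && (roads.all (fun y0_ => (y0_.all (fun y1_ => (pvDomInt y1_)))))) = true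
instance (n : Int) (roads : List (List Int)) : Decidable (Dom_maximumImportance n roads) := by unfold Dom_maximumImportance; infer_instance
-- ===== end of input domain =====

-- B replaces A's recursive val-summing DFS by an iterative explicit-stack DFS that counts
-- tree edges out of even-depth nodes and multiplies by n once at the end (return value only).

-- ===== PORT A =====
def mkGraphA (roads : List (List Int)) : PySem.Dict Int (List Int) :=
  roads.foldl (fun g road =>
    match road with
    | [a, b] => (g.modify a [] (· ++ [b])).modify b [] (· ++ [a])
    | _ => g) PySem.Dict.empty

mutual
def dfsA (g : PySem.Dict Int (List Int)) (n : Int) :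
    Nat → Int → Int → List Bool → List Int → Option (Int × List Bool × List Int)
  | 0, _, _, _, _ => none
  | f + 1, node, val, vis, vals =>
      loopA g n f val (g.getD node [])
        0 (PySem.List.pySetD vis node true) (PySem.List.pySetD vals node val)
termination_by f _ _ _ _ => ((f : Nat), 0)

def loopA (g : PySem.Dict Int (List Int)) (n : Int) :
    Nat → Int → List Int → Int → List Bool → List Int → Option (Int × List Bool × List Int)
  | _, _, [], imp, vis, vals => some (imp, vis, vals)
  | f, val, nb :: rest, imp, vis, vals =>
      if (PySem.List.pyGet? vis nb).getD false then
        loopA g n f val rest imp vis vals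
      else
        match dfsA g n f nb (n - val) vis vals with
        | none => none
        | some (r, vis', vals') => loopA g n f val rest (imp + val + r) vis' vals'
termination_by f _ nbrs _ _ _ => (f, nbrs.length + 1)
end

def maximumImportance (n : Int) (roads : List (List Int)) : Int :=
  let g := mkGraphA roads
  let vis := List.replicate n.toNat false
  let vals := List.replicate n.toNat (-1 : Int)
  match dfsA g n (n.toNat + 1) 0 n vis vals with
  | some (imp, _, _) => imp
  | none => 0

-- ===== PORT B =====
def mkAdjB (roads : List (List Int)) : PySem.Dict Int (List Int) :=
  roads.foldl (fun d road =>
    match road with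
    | [a, b] =>
        let d1 := d.insert a (d.getD a [] ++ [b])
        d1.insert b (d1.getD b [] ++ [a])
    | _ => d) PySem.Dict.empty

-- termination helpers for runB (cited by the port's decreasing_by)
theorem pv_pyIdx_lt {len : Nat} {i : Int} {k : Nat}
    (h : PySem.List.pyIdx? len i = some k) : k < len := by
  unfold PySem.List.pyIdx? at h
  split_ifs at h <;> simp_all <;> omega

theorem pv_mark_count {xs : List Bool} {i : Int}
    (h : PySem.List.pyGet? xs i = some false) :
    (PySem.List.pySetD xs i true).count false + 1 = xs.count false := by
  rcases hidx : PySem.List.pyIdx? xs.length i with _ | k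
  · unfold PySem.List.pyGet? at h; rw [hidx] at h; simp at h
  · have hk : k < xs.length := pv_pyIdx_lt hidx
    have hx : xs[k] = false := by
      unfold PySem.List.pyGet? at h; rw [hidx] at h
      simpa [List.getElem?_eq_getElem hk] using h
    have hpos : 0 < xs.count false :=
      List.count_pos_iff.mpr (hx ▸ List.getElem_mem hk)
    unfold PySem.List.pySetD PySem.List.pySet?
    rw [hidx]
    simp only [Option.map_some, Option.getD_some]
    rw [List.count_set hk]
    simp [hx]
    omega

def pvTotalLen (g : PySem.Dict Int (List Int)) : Nat :=
  (g.items.map (fun p => p.2.length)).sum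

theorem pv_deg_le (g : PySem.Dict Int (List Int)) (v : Int) :
    (g.getD v []).length ≤ pvTotalLen g := by
  rcases h : g.get? v with _ | l
  · simp [PySem.Dict.getD_of_get?_eq_none _ _ h]
  · have hm : (v, l) ∈ g.items := PySem.Dict.mem_items_of_get?_eq_some _ h
    have hmem : l.length ∈ g.items.map (fun p => p.2.length) :=
      List.mem_map.mpr ⟨(v, l), hm, rfl⟩
    have := List.single_le_sum (l := g.items.map (fun p => p.2.length))
      (fun x _ => Nat.zero_le x) _ hmem
    simpa [pvTotalLen, PySem.Dict.getD_eq_get?_getD, h] using this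

theorem pv_unvisited {vis : List Bool} {v : Int}
    (h : ¬((PySem.List.pyGet? vis v).getD true = true)) :
    PySem.List.pyGet? vis v = some false := by
  rcases hg : PySem.List.pyGet? vis v with _ | b
  · simp [hg] at h
  · cases b
    · rfl
    · simp [hg] at h

def runB (g : PySem.Dict Int (List Int)) :
    List (Bool × List Int × Int) → List Bool → Int → Int
  | [], _, res => res
  | (ev, nbrs, acc) :: rest, vis, res =>
      match nbrs with
      | v :: tl =>
          if (PySem.List.pyGet? vis v).getD true then
            runB g ((ev, tl, acc) :: rest) vis res
          else
            runB g ((!ev, g.getD v [], 0) :: (ev, tl, acc) :: rest)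
              (PySem.List.pySetD vis v true) res
      | [] =>
          match rest with
          | (e2, nb2, acc2) :: rest' =>
              runB g ((e2, nb2, acc2 + (if e2 then 1 else 0) + acc) :: rest') vis res
          | [] => runB g [] vis acc
termination_by stack vis _ =>
  (pvTotalLen g + 1) * vis.count false + (stack.map (fun fr => fr.2.1.length + 1)).sum
decreasing_by
  all_goals simp
  rename_i hvis
  rw [← pv_mark_count (pv_unvisited hvis), Nat.mul_succ]
  have := pv_deg_le g v
  omega

def maximumImportance_alt (n : Int) (roads : List (List Int)) : Int :=
  let adj := mkAdjB roads
  let vis := PySem.List.pySetD (List.replicate n.toNat false) 0 true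
  n * runB adj [(true, adj.getD 0 [], 0)] vis 0

-- ===== PRECONDITION & SPEC =====
-- Pre_ excludes the inputs where A raises (n < 1, a road whose length is not 2, or an
-- out-of-range node label while 0 occurs in some road); out-of-range labels that are
-- unreachable from node 0 make A return, so Pre_ is slightly narrower than A's crash set.
def Pre_maximumImportance (n : Int) (roads : List (List Int)) : Prop :=
  1 ≤ n ∧ (∀ road ∈ roads, road.length = 2) ∧
    ((∀ road ∈ roads, ∀ x ∈ road, -n ≤ x ∧ x < n) ∨ (∀ road ∈ roads, (0 : Int) ∉ road))
instance (n : Int) (roads : List (List Int)) : Decidable (Pre_maximumImportance n roads) := by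
  unfold Pre_maximumImportance; infer_instance
def pvWitness_maximumImportance : Int × List (List Int) := (3, [[0, 1], [1, 2]])

def Spec_maximumImportance (n : Int) (roads : List (List Int)) (out : Int) : Prop := out = maximumImportance_alt n roads
instance (n : Int) (roads : List (List Int)) (out : Int) : Decidable (Spec_maximumImportance n roads out) := by unfold Spec_maximumImportance; infer_instance

-- ===== CLAIM (what is proved, stated in full; the proofs are below) =====
def Claim_equal_maximumImportance : Prop := ∀ (n : Int) (roads : List (List Int)), Dom_maximumImportance n roads → Pre_maximumImportance n roads → Spec_maximumImportance n roads (maximumImportance n roads)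

-- ===== LEMMAS AND PROOFS =====

theorem pv_graphs_eq (roads : List (List Int)) : mkAdjB roads = mkGraphA roads := rfl

theorem pv_graph_range_aux (n : Int) (roads : List (List Int)) :
    ∀ d : PySem.Dict Int (List Int),
    (∀ v x, x ∈ d.getD v [] → -n ≤ x ∧ x < n) →
    (∀ road ∈ roads, ∀ x ∈ road, -n ≤ x ∧ x < n) →
    ∀ v x, x ∈ (roads.foldl (fun g road =>
      match road with
      | [a, b] => (g.modify a [] (· ++ [b])).modify b [] (· ++ [a])
      | _ => g) d).getD v [] → -n ≤ x ∧ x < n := by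
  induction roads with
  | nil => intro d hd _; simpa using hd
  | cons road rs ih =>
      intro d hd hr
      rw [List.foldl_cons]
      refine ih _ ?_ (fun r hm x hx => hr r (by simp [hm]) x hx)
      rcases road with _ | ⟨a, t⟩
      · simpa using hd
      rcases t with _ | ⟨b, t2⟩
      · simpa using hd
      rcases t2 with _ | ⟨c, t3⟩
      swap
      · simpa using hd
      have hab : ∀ x ∈ [a, b], -n ≤ x ∧ x < n := hr [a, b] (by simp)
      intro v x hx
      simp only [PySem.Dict.modify, PySem.Dict.getD_insert] at hx
      split_ifs at hx <;>
      · try simp only [List.mem_append, List.mem_singleton] at hx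
        first
        | exact hd _ _ hx
        | · rcases hx with hx | rfl
            · first
              | exact hd _ _ hx
              | · rcases hx with hx | rfl
                  · exact hd _ _ hx
                  · exact hab _ (by simp)
            · exact hab _ (by simp)

theorem pv_graph_range (n : Int) (roads : List (List Int))
    (hr : ∀ road ∈ roads, road.length = 2 ∧ ∀ x ∈ road, -n ≤ x ∧ x < n) :
    ∀ v x, x ∈ (mkGraphA roads).getD v [] → -n ≤ x ∧ x < n := by
  unfold mkGraphA
  refine pv_graph_range_aux n roads PySem.Dict.empty ?_ (fun r hm => (hr r hm).2)
  intro v x hx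
  simp [PySem.Dict.getD_empty] at hx

theorem runB_skip (g : PySem.Dict Int (List Int)) (ev : Bool) (v : Int) (tl : List Int)
    (acc : Int) (rest : List (Bool × List Int × Int)) (vis : List Bool) (res : Int)
    (h : (PySem.List.pyGet? vis v).getD true = true) :
    runB g ((ev, v :: tl, acc) :: rest) vis res = runB g ((ev, tl, acc) :: rest) vis res := by
  rw [runB]
  simp [h]

theorem runB_push (g : PySem.Dict Int (List Int)) (ev : Bool) (v : Int) (tl : List Int)
    (acc : Int) (rest : List (Bool × List Int × Int)) (vis : List Bool) (res : Int)
    (h : (PySem.List.pyGet? vis v).getD true = false) :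
    runB g ((ev, v :: tl, acc) :: rest) vis res
      = runB g ((!ev, g.getD v [], 0) :: (ev, tl, acc) :: rest)
          (PySem.List.pySetD vis v true) res := by
  rw [runB]
  simp [h]

theorem runB_merge (g : PySem.Dict Int (List Int)) (e1 : Bool) (acc1 : Int) (e2 : Bool)
    (nb2 : List Int) (acc2 : Int) (rest : List (Bool × List Int × Int)) (vis : List Bool)
    (res : Int) :
    runB g ((e1, [], acc1) :: (e2, nb2, acc2) :: rest) vis res
      = runB g ((e2, nb2, acc2 + (if e2 then 1 else 0) + acc1) :: rest) vis res := by
  rw [runB]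

theorem runB_last (g : PySem.Dict Int (List Int)) (ev : Bool) (acc : Int)
    (vis : List Bool) (res : Int) :
    runB g [(ev, [], acc)] vis res = acc := by
  rw [runB, runB]

theorem pv_sim (g : PySem.Dict Int (List Int)) (n : Int) (hn : 0 ≤ n)
    (Hg : ∀ v x, x ∈ g.getD v [] → -n ≤ x ∧ x < n) :
    ∀ (f : Nat) (nbrs : List Int), (∀ x ∈ nbrs, -n ≤ x ∧ x < n) →
    ∀ (ev : Bool) (val imp : Int) (vis : List Bool) (vals : List Int)
      (imp₂ : Int) (vis₂ : List Bool) (vals₂ : List Int),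
      val = (if ev then n else 0) →
      vis.length = n.toNat →
      loopA g n f val nbrs imp vis vals = some (imp₂, vis₂, vals₂) →
      vis₂.length = n.toNat ∧
      ∃ c : Int, imp₂ = imp + n * c ∧
        ∀ (rest : List (Bool × List Int × Int)) (acc res : Int),
          runB g ((ev, nbrs, acc) :: rest) vis res
            = runB g ((ev, [], acc + c) :: rest) vis₂ res := by
  intro f
  induction f using Nat.strong_induction_on with
  | _ f IHf =>
  intro nbrs
  induction nbrs with
  | nil =>
    intro hnb ev val imp vis vals imp₂ vis₂ vals₂ hval hlen h
    rw [loopA] at h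
    cases h
    refine ⟨hlen, 0, by ring, ?_⟩
    intro rest acc res
    norm_num
  | cons nb tl ihtl =>
    intro hnb ev val imp vis vals imp₂ vis₂ vals₂ hval hlen h
    rw [loopA] at h
    split_ifs at h with hv
    · obtain ⟨hlen₂, c, himp, hrun⟩ :=
        ihtl (fun x hx => hnb x (by simp [hx])) _ _ _ _ _ _ _ _ hval hlen h
      refine ⟨hlen₂, c, himp, ?_⟩
      intro rest acc res
      have hsome : PySem.List.pyGet? vis nb = some true := by
        rcases hg : PySem.List.pyGet? vis nb with _ | b
        · simp [hg] at hv
        · cases b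
          · simp [hg] at hv
          · rfl
      rw [runB_skip g ev nb tl acc rest vis res (by rw [hsome]; rfl)]
      exact hrun rest acc res
    · have hlen' : (vis.length : Int) = n := by
        rw [hlen]; exact Int.toNat_of_nonneg hn
      have hx := hnb nb (by simp)
      have hsome : PySem.List.pyGet? vis nb = some false := by
        rcases hg : PySem.List.pyGet? vis nb with _ | b
        · exfalso
          refine (PySem.List.pyGet?_eq_none_iff _ _).mp hg ⟨?_, ?_⟩
          · rw [hlen']; exact hx.1
          · rw [hlen']; exact hx.2
        · cases b
          · rfl
          · simp [hg] at hv
      cases f with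
      | zero => rw [dfsA] at h; simp at h
      | succ f' =>
        rw [dfsA] at h
        rcases hin : loopA g n f' (n - val) (g.getD nb []) 0
            (PySem.List.pySetD vis nb true) (PySem.List.pySetD vals nb (n - val))
          with _ | ⟨r, vis', vals'⟩
        · rw [hin] at h; simp at h
        · rw [hin] at h
          simp only at h
          obtain ⟨hlen', c₁, hr₁, hrun₁⟩ := IHf f' (by omega) (g.getD nb []) (Hg nb)
            (!ev) (n - val) 0 (PySem.List.pySetD vis nb true)
            (PySem.List.pySetD vals nb (n - val)) r vis' vals'
            (by cases ev <;> simp [hval])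
            (by rw [PySem.List.length_pySetD]; exact hlen) hin
          obtain ⟨hlen₂, c₂, himp₂, hrun₂⟩ :=
            ihtl (fun x hx => hnb x (by simp [hx])) ev val _ vis' vals' _ _ _ hval hlen' h
          refine ⟨hlen₂, (if ev then 1 else 0) + c₁ + c₂, ?_, ?_⟩
          · rw [himp₂, hr₁]
            have hv' : val = n * (if ev then 1 else 0) := by cases ev <;> simp [hval]
            rw [hv']; ring
          · intro rest acc res
            rw [runB_push g ev nb tl acc rest vis res (by rw [hsome]; rfl)]
            rw [hrun₁ ((ev, tl, acc) :: rest) 0 res]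
            rw [runB_merge]
            rw [hrun₂ rest (acc + (if ev then 1 else 0) + (0 + c₁)) res]
            rw [show acc + (if ev then 1 else 0) + (0 + c₁) + c₂
                  = acc + ((if ev then 1 else 0) + c₁ + c₂) from by ring]

theorem pv_setD_count_le (xs : List Bool) (i : Int) :
    (PySem.List.pySetD xs i true).count false ≤ xs.count false := by
  rcases hidx : PySem.List.pyIdx? xs.length i with _ | k
  · unfold PySem.List.pySetD PySem.List.pySet?; rw [hidx]; simp
  · have hk : k < xs.length := pv_pyIdx_lt hidx
    unfold PySem.List.pySetD PySem.List.pySet?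
    rw [hidx]
    simp only [Option.map_some, Option.getD_some]
    rw [List.count_set hk]
    simp only [show (true == false) = false from rfl, Bool.false_eq_true, if_false]
    split <;> omega

theorem pv_mono (g : PySem.Dict Int (List Int)) (n : Int) :
    ∀ (f : Nat) (nbrs : List Int) (val imp : Int) (vis : List Bool) (vals : List Int)
      (imp₂ : Int) (vis₂ : List Bool) (vals₂ : List Int),
      loopA g n f val nbrs imp vis vals = some (imp₂, vis₂, vals₂) →
      vis₂.length = vis.length ∧ vis₂.count false ≤ vis.count false := by
  intro f
  induction f using Nat.strong_induction_on with
  | _ f IHf =>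
  intro nbrs
  induction nbrs with
  | nil =>
    intro val imp vis vals imp₂ vis₂ vals₂ h
    rw [loopA] at h
    cases h
    exact ⟨rfl, le_refl _⟩
  | cons nb tl ihtl =>
    intro val imp vis vals imp₂ vis₂ vals₂ h
    rw [loopA] at h
    split_ifs at h with hv
    · exact ihtl _ _ _ _ _ _ _ h
    · cases f with
      | zero => rw [dfsA] at h; simp at h
      | succ f' =>
        rw [dfsA] at h
        rcases hin : loopA g n f' (n - val) (g.getD nb []) 0
            (PySem.List.pySetD vis nb true) (PySem.List.pySetD vals nb (n - val))
          with _ | ⟨r, vis', vals'⟩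
        · rw [hin] at h; simp at h
        · rw [hin] at h
          simp only at h
          have h1 := IHf f' (by omega) _ _ _ _ _ _ _ _ hin
          have h2 := ihtl _ _ _ _ _ _ _ h
          refine ⟨?_, ?_⟩
          · rw [h2.1, h1.1, PySem.List.length_pySetD]
          · calc vis₂.count false ≤ vis'.count false := h2.2
              _ ≤ (PySem.List.pySetD vis nb true).count false := h1.2
              _ ≤ vis.count false := pv_setD_count_le vis nb

theorem pv_suff (g : PySem.Dict Int (List Int)) (n : Int) (hn : 0 ≤ n)
    (Hg : ∀ v x, x ∈ g.getD v [] → -n ≤ x ∧ x < n) :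
    ∀ (f : Nat) (nbrs : List Int), (∀ x ∈ nbrs, -n ≤ x ∧ x < n) →
    ∀ (val imp : Int) (vis : List Bool) (vals : List Int),
      vis.length = n.toNat → vis.count false ≤ f →
      (loopA g n f val nbrs imp vis vals).isSome := by
  intro f
  induction f using Nat.strong_induction_on with
  | _ f IHf =>
  intro nbrs
  induction nbrs with
  | nil => intro hnb val imp vis vals hlen hcnt; rw [loopA]; simp
  | cons nb tl ihtl =>
    intro hnb val imp vis vals hlen hcnt
    rw [loopA]
    split_ifs with hv
    · exact ihtl (fun x hx => hnb x (by simp [hx])) _ _ _ _ hlen hcnt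
    · have hlen' : (vis.length : Int) = n := by
        rw [hlen]; exact Int.toNat_of_nonneg hn
      have hx := hnb nb (by simp)
      have hsome : PySem.List.pyGet? vis nb = some false := by
        rcases hg : PySem.List.pyGet? vis nb with _ | b
        · exfalso
          refine (PySem.List.pyGet?_eq_none_iff _ _).mp hg ⟨?_, ?_⟩
          · rw [hlen']; exact hx.1
          · rw [hlen']; exact hx.2
        · cases b
          · rfl
          · simp [hg] at hv
      have hcd := pv_mark_count hsome
      cases f with
      | zero => exact absurd hcnt (by omega)
      | succ f' =>
        rw [dfsA]
        have hrec := IHf f' (by omega) (g.getD nb []) (Hg nb) (n - val) 0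
          (PySem.List.pySetD vis nb true) (PySem.List.pySetD vals nb (n - val))
          (by rw [PySem.List.length_pySetD]; exact hlen) (by omega)
        rcases hres : loopA g n f' (n - val) (g.getD nb []) 0
            (PySem.List.pySetD vis nb true) (PySem.List.pySetD vals nb (n - val))
          with _ | ⟨r, vis', vals'⟩
        · rw [hres] at hrec; simp at hrec
        · have hm := pv_mono g n f' _ _ _ _ _ _ _ _ hres
          refine ihtl (fun x hx => hnb x (by simp [hx])) _ _ _ _ ?_ ?_
          · rw [hm.1, PySem.List.length_pySetD]; exact hlen
          · have := hm.2
            omega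

-- ===== VERDICT (by name: the statement is the Claim_ definition above) =====
theorem pv_no_zero_aux (roads : List (List Int)) :
    ∀ d : PySem.Dict Int (List Int),
    (∀ road ∈ roads, (0 : Int) ∉ road) → d.getD 0 [] = [] →
    (roads.foldl (fun g road =>
      match road with
      | [a, b] => (g.modify a [] (· ++ [b])).modify b [] (· ++ [a])
      | _ => g) d).getD 0 [] = [] := by
  induction roads with
  | nil => intro d _ hd; simpa using hd
  | cons road rs ih =>
      intro d hz hd
      rw [List.foldl_cons]
      refine ih _ (fun r hm => hz r (by simp [hm])) ?_
      rcases road with _ | ⟨a, t⟩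
      · exact hd
      rcases t with _ | ⟨b, t2⟩
      · exact hd
      rcases t2 with _ | ⟨c, t3⟩
      swap
      · exact hd
      have ha : a ≠ 0 := fun h => hz [a, b] (by simp) (by simp [h])
      have hb : b ≠ 0 := fun h => hz [a, b] (by simp) (by simp [h])
      simp only [PySem.Dict.modify, PySem.Dict.getD_insert]
      rw [if_neg (show ¬(0 : Int) = b from fun h => hb h.symm),
        if_neg (show ¬(0 : Int) = a from fun h => ha h.symm)]
      exact hd

theorem pv_mkGraphA_zero (roads : List (List Int))
    (hz : ∀ road ∈ roads, (0 : Int) ∉ road) : (mkGraphA roads).getD 0 [] = [] := by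
  unfold mkGraphA
  exact pv_no_zero_aux roads PySem.Dict.empty hz (by simp [PySem.Dict.getD_empty])

theorem maximumImportance_spec : Claim_equal_maximumImportance := by
  intro n roads _hDom hPre
  obtain ⟨hn1, hlen2, hcase⟩ := hPre
  have hn : (0 : Int) ≤ n := by omega
  unfold Spec_maximumImportance
  simp only [maximumImportance, maximumImportance_alt, pv_graphs_eq]
  rcases hcase with hrange | hzero
  swap
  · -- node 0 occurs in no road: both sides are 0
    rw [dfsA, pv_mkGraphA_zero roads hzero, loopA, runB_last]
    simp
  have hroads : ∀ road ∈ roads, road.length = 2 ∧ ∀ x ∈ road, -n ≤ x ∧ x < n :=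
    fun r hm => ⟨hlen2 r hm, hrange r hm⟩
  have Hg := pv_graph_range n roads hroads
  rw [dfsA]
  have hget0 : PySem.List.pyGet? (List.replicate n.toNat false) 0 = some false := by
    have h0 : 0 < n.toNat := by omega
    have h1 : (0 : Int) < n := by omega
    unfold PySem.List.pyGet? PySem.List.pyIdx?
    simp [h0, h1]
  have hlen0 : (PySem.List.pySetD (List.replicate n.toNat false) 0 true).length = n.toNat := by
    rw [PySem.List.length_pySetD, List.length_replicate]
  have hcnt := pv_mark_count hget0
  have hsuff := pv_suff (mkGraphA roads) n hn Hg n.toNat ((mkGraphA roads).getD 0 []) (Hg 0)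
      n 0 (PySem.List.pySetD (List.replicate n.toNat false) 0 true)
      (PySem.List.pySetD (List.replicate n.toNat (-1 : Int)) 0 n)
      hlen0 (by simp at hcnt ⊢; omega)
  rcases hres : loopA (mkGraphA roads) n n.toNat n ((mkGraphA roads).getD 0 []) 0
      (PySem.List.pySetD (List.replicate n.toNat false) 0 true)
      (PySem.List.pySetD (List.replicate n.toNat (-1 : Int)) 0 n)
    with _ | ⟨imp, vis₂, vals₂⟩
  · rw [hres] at hsuff; simp at hsuff
  ·
    obtain ⟨hlen₂, c, himp, hrun⟩ := pv_sim (mkGraphA roads) n hn Hg n.toNat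
      ((mkGraphA roads).getD 0 []) (Hg 0) true n 0
      (PySem.List.pySetD (List.replicate n.toNat false) 0 true)
      (PySem.List.pySetD (List.replicate n.toNat (-1 : Int)) 0 n)
      imp vis₂ vals₂ (by simp) hlen0 hres
    simp only
    rw [hrun [] 0 0, runB_last, himp]
    ring
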